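-- pv_equiv track=rewrite | github.com/hacors/new | ACM/Temp/choc.py | getchock
-- ===== SOURCE A (Python) =====
-- def getchock(n):
--     if n < 6:
--         return 0
--     else:
--         templist = [1]
--         for left_candy in range(1, n-5):
--             temp = sum(templist)
--             templist.append(temp)
--         return sum(templist)
-- ===== SOURCE B (Python) =====
-- def getchock(n):
--     return 0 if n < 6 else 2 ** (n - 6)
-- ===== Notes on version B (the rewrite author's own statement) =====
-- stated objective: faster
-- what changed: Replaced the quadratic loop that appends running sums to a list (and re-sums it each iteration) by the closed form 2^(n-6) for n >= 6, else 0.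
import Mathlib
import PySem

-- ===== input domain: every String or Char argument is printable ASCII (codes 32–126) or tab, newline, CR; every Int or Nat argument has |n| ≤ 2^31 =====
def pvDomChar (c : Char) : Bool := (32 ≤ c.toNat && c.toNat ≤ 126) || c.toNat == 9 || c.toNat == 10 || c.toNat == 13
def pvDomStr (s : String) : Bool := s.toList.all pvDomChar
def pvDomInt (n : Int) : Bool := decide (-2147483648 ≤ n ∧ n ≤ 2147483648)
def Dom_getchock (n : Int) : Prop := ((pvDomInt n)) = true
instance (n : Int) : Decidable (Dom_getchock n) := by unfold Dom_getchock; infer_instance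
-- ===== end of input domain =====

-- B replaces the quadratic sum-and-append loop by the closed form 2^(n-6) (faster).
-- ===== PORT A =====
def getchock (n : Int) : Int :=
  if n < 6 then 0
  else
    let templist := (PySem.List.pyRange 1 (n - 5) 1).foldl
      (fun acc (_ : Int) => acc ++ [acc.sum]) ([1] : List Int)
    templist.sum

-- ===== PORT B =====
def getchock_alt (n : Int) : Int :=
  if n < 6 then 0 else 2 ^ (n - 6).toNat

-- ===== PRECONDITION & SPEC =====
def Spec_getchock (n : Int) (out : Int) : Prop := out = getchock_alt n
instance (n : Int) (out : Int) : Decidable (Spec_getchock n out) := by unfold Spec_getchock; infer_instance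

-- ===== CLAIM (what is proved, stated in full; the proofs are below) =====
def Claim_equal_getchock : Prop := ∀ (n : Int), Dom_getchock n → Spec_getchock n (getchock n)

-- ===== LEMMAS AND PROOFS =====
theorem sum_fold_double (xs : List Int) (l : List Int) :
    (xs.foldl (fun acc (_ : Int) => acc ++ [acc.sum]) l).sum = l.sum * 2 ^ xs.length := by
  induction xs generalizing l with
  | nil => simp
  | cons x xs ih =>
      simp only [List.foldl_cons, ih, List.sum_append, List.length_cons,
        List.sum_cons, List.sum_nil, add_zero]
      ring

-- ===== VERDICT (by name: the statement is the Claim_ definition above) =====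
theorem getchock_spec : Claim_equal_getchock := by
  intro n _
  unfold Spec_getchock getchock getchock_alt
  by_cases h : n < 6
  · simp [h]
  · simp only [h, if_false]
    rw [sum_fold_double, PySem.List.length_pyRange_one]
    have : n - 5 - 1 = n - 6 := by omega
    simp [this]
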